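-- pv_equiv track=rewrite | github.com/FengyiQuan/Snarl | src/ICharacter.py | print_visible
-- ===== SOURCE A (Python) =====
-- def print_visible(surrounding):
--     res = ''
--     col_length = max([row for (row, col) in surrounding.keys()])
--     row_length = max([col for (row, col) in surrounding.keys()])
--     for row in range(row_length + 1):
--         for col in range(col_length + 1):
--             target = surrounding.get((col, row))
--             if target is not None:
--                 res += target + ' '
--             else:
--                 res += '  '
--         res += '\n'
--
--     return res
-- ===== SOURCE B (Python) =====
-- def print_visible(surrounding):
--     # Scatter approach: pre-fill a (row_length+1) x (col_length+1) grid of '  '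
--     # cells, place each present entry once at grid[r][c], then join.
--     col_length = max(c for c, r in surrounding.keys())
--     row_length = max(r for c, r in surrounding.keys())
--     grid = [['  '] * (col_length + 1) for _ in range(row_length + 1)]
--     for (c, r), v in surrounding.items():
--         if c >= 0 and r >= 0:
--             grid[r][c] = v + ' '
--     return ''.join(''.join(cells) + '\n' for cells in grid)
-- ===== Notes on version B (the rewrite author's own statement) =====
-- stated objective: alternative
-- what changed: B replaces A's per-cell dict lookup over the whole grid by a single scatter pass that places each present entry into a pre-filled grid of blank cells and then joins the rows; Pre_ excludes the empty dict (max([]) raises ValueError in both A and B) and, as the dict representation invariant, association lists repeating a key.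
-- outside the precondition, e.g. on print_visible({}): A raises ValueError, B raises ValueError
import Mathlib
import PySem

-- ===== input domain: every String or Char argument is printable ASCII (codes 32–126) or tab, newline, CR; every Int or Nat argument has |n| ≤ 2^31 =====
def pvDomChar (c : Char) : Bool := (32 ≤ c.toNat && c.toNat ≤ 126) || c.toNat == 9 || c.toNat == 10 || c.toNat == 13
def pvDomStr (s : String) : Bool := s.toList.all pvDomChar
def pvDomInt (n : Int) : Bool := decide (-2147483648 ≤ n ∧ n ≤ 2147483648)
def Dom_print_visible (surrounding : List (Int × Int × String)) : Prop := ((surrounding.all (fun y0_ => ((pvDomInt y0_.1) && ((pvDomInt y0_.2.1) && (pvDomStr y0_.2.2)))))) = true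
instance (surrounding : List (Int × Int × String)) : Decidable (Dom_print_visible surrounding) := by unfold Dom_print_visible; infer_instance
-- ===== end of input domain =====

-- B replaces A's cell-by-cell dict lookup by a single scatter pass into a pre-filled
-- grid, then joins the rows (objective: alternative decomposition, same cost class).

-- ===== PORT A =====
-- surrounding.get((col, row)): first-match lookup on the association list
-- representing the Python dict (dict keys are unique, see Pre_).
def pvDictGet (surrounding : List (Int × Int × String)) (k : Int × Int) : Option String :=
  (surrounding.find? (fun p => p.1 == k.1 && p.2.1 == k.2)).map (fun p => p.2.2)

def print_visible (surrounding : List (Int × Int × String)) : String :=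
  match PySem.List.max? (surrounding.map (fun p => p.1)) (fun x => x),
        PySem.List.max? (surrounding.map (fun p => p.2.1)) (fun x => x) with
  | some col_length, some row_length =>
      (PySem.List.pyRange 0 (row_length + 1) 1).foldl (fun res row =>
        ((PySem.List.pyRange 0 (col_length + 1) 1).foldl (fun res col =>
          match pvDictGet surrounding (col, row) with
          | some target => res ++ target ++ " "
          | none => res ++ "  ") res) ++ "\n") ""
  | _, _ => ""   -- unreachable under Pre_: max([]) raises ValueError

-- ===== PORT B =====
-- one scatter step: grid[r][c] = v + ' '  (guarded on nonnegative coordinates)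
def pvScatterStep (g : List (List String)) (p : Int × Int × String) : List (List String) :=
  if 0 ≤ p.1 ∧ 0 ≤ p.2.1 then
    g.modify p.2.1.toNat (fun cells => cells.set p.1.toNat (p.2.2 ++ " "))
  else g

def print_visible_alt (surrounding : List (Int × Int × String)) : String :=
  match PySem.List.max? (surrounding.map (fun p => p.1)) (fun x => x) with
  | none => ""   -- unreachable under Pre_: max() raises ValueError in B too
  | some col_length =>
    match PySem.List.max? (surrounding.map (fun p => p.2.1)) (fun x => x) with
    | none => ""
    | some row_length =>
      let grid := surrounding.foldl pvScatterStep
        (List.replicate (row_length + 1).toNat (List.replicate (col_length + 1).toNat "  "))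
      PySem.Str.join "" (grid.map (fun cells => PySem.Str.join "" cells ++ "\n"))

-- ===== PRECONDITION & SPEC =====
-- Pre_ excludes the empty dict, on which Python's max([]) raises ValueError in both
-- A and B, and (the dict representation invariant) association lists that repeat a
-- key (col, row) — a Python dict never does.
def Pre_print_visible (surrounding : List (Int × Int × String)) : Prop :=
  surrounding ≠ [] ∧ (surrounding.map (fun p => (p.1, p.2.1))).Nodup
instance (surrounding : List (Int × Int × String)) : Decidable (Pre_print_visible surrounding) := by unfold Pre_print_visible; infer_instance

def pvWitness_print_visible : (List (Int × Int × String)) := [(0, 0, "a"), (1, 0, "b")]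

def Spec_print_visible (surrounding : List (Int × Int × String)) (out : String) : Prop := out = print_visible_alt surrounding
instance (surrounding : List (Int × Int × String)) (out : String) : Decidable (Spec_print_visible surrounding out) := by unfold Spec_print_visible; infer_instance

-- ===== CLAIM (what is proved, stated in full; the proofs are below) =====
def Claim_equal_print_visible : Prop := ∀ (surrounding : List (Int × Int × String)), Dom_print_visible surrounding → Pre_print_visible surrounding → Spec_print_visible surrounding (print_visible surrounding)

-- ===== LEMMAS AND PROOFS =====

-- the rendered content of one cell of the output
def pvCell (s : List (Int × Int × String)) (col row : Int) : String :=
  match pvDictGet s (col, row) with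
  | some t => t ++ " "
  | none => "  "

-- last-match lookup (what the left-to-right scatter pass leaves at a cell)
def pvLastGet : List (Int × Int × String) → Int × Int → Option String
  | [], _ => none
  | p :: l, k =>
      match pvLastGet l k with
      | some v => some v
      | none => if p.1 = k.1 ∧ p.2.1 = k.2 then some p.2.2 else none

theorem pv_sjoin_nil : PySem.Str.join "" ([] : List String) = "" := rfl

theorem pv_intercalate_nil (l : List (List Char)) : ([] : List Char).intercalate l = l.flatten := by
  induction l with
  | nil => rfl
  | cons a t ih => cases t <;> simp_all [List.intercalate, List.intersperse]

theorem pv_sjoin_cons (a : String) (l : List String) :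
    PySem.Str.join "" (a :: l) = a ++ PySem.Str.join "" l := by
  simp [PySem.Str.join, PySem.Chars.join, pv_intercalate_nil, String.ofList_append,
    String.ofList_toList]

theorem pv_foldl_append (l : List Int) (g : Int → String) :
    ∀ init : String, l.foldl (fun res x => res ++ g x) init = init ++ PySem.Str.join "" (l.map g) := by
  induction l with
  | nil => intro init; simp [pv_sjoin_nil]
  | cons a t ih =>
      intro init
      simp only [List.foldl_cons, List.map_cons, pv_sjoin_cons, ih, String.append_assoc]

theorem pv_scatter_step_length (G : List (List String)) (p : Int × Int × String) :
    (pvScatterStep G p).length = G.length := by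
  unfold pvScatterStep; split <;> simp

theorem pv_scatter_length (l : List (Int × Int × String)) (G : List (List String)) :
    (l.foldl pvScatterStep G).length = G.length := by
  induction l generalizing G with
  | nil => rfl
  | cons p t ih => simp [List.foldl_cons, ih, pv_scatter_step_length]

theorem pv_scatter_step_rows (G : List (List String)) (p : Int × Int × String) (W : Nat)
    (hW : ∀ row ∈ G, row.length = W) : ∀ row ∈ pvScatterStep G p, row.length = W := by
  intro row hrow
  unfold pvScatterStep at hrow
  split at hrow
  · rcases List.mem_iff_getElem?.1 hrow with ⟨j, hj⟩
    rcases h' : G[j]? with _ | row'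
    · simp [List.getElem?_modify, h'] at hj
    · have hmem : row' ∈ G := List.mem_of_getElem? h'
      rw [List.getElem?_modify] at hj
      simp only [h', Option.map_eq_map, Option.map_some, Option.some.injEq] at hj
      split at hj
      · rw [← hj, List.length_set]; exact hW row' hmem
      · rw [← hj]; exact hW row' hmem
  · exact hW row hrow

theorem pv_scatter_rows (l : List (Int × Int × String)) (G : List (List String)) (W : Nat)
    (hW : ∀ row ∈ G, row.length = W) : ∀ row ∈ l.foldl pvScatterStep G, row.length = W := by
  induction l generalizing G with
  | nil => exact hW
  | cons p t ih => exact ih _ (pv_scatter_step_rows G p W hW)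

-- the heart: after the scatter pass the cell (r, c) holds the last matching entry,
-- or the original content of G where no entry matches
theorem pv_scatter_cell (l : List (Int × Int × String)) (G : List (List String)) (r c W : Nat)
    (hr : r < G.length) (hW : ∀ row ∈ G, row.length = W) (hcW : c < W) :
    ((l.foldl pvScatterStep G)[r]?.bind (fun row => row[c]?)) =
      match pvLastGet l ((c : Int), (r : Int)) with
      | some v => some (v ++ " ")
      | none => G[r]?.bind (fun row => row[c]?) := by
  induction l generalizing G with
  | nil => simp [pvLastGet]
  | cons p t ih =>
      have hr' : r < (pvScatterStep G p).length := by rw [pv_scatter_step_length]; exact hr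
      have hW' := pv_scatter_step_rows G p W hW
      rw [List.foldl_cons, ih (pvScatterStep G p) hr' hW']
      show _ = (match pvLastGet (p :: t) ((c : Int), (r : Int)) with
        | some v => some (v ++ " ")
        | none => G[r]?.bind (fun row => row[c]?))
      rcases hlast : pvLastGet t ((c : Int), (r : Int)) with _ | v
      · -- head entry decides
        by_cases hkey : p.1 = (c : Int) ∧ p.2.1 = (r : Int)
        · -- the head writes exactly at (r, c)
          have hg : (0 ≤ p.1 ∧ 0 ≤ p.2.1) := ⟨by omega, by omega⟩
          have hrow : G[r]? = some G[r] := List.getElem?_eq_getElem hr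
          have hclen : c < G[r].length := by rw [hW _ (List.getElem_mem hr)]; exact hcW
          simp only [pvLastGet, hlast, hkey, and_self, if_true, pvScatterStep]
          rw [if_pos ⟨Int.natCast_nonneg _, Int.natCast_nonneg _⟩, Int.toNat_natCast,
            Int.toNat_natCast, List.getElem?_modify]
          simp [hrow, hclen]
        · -- the head writes elsewhere (or is skipped)
          have hskip : (pvScatterStep G p)[r]?.bind (fun row => row[c]?) =
              G[r]?.bind (fun row => row[c]?) := by
            unfold pvScatterStep
            split
            · rename_i hg
              rw [List.getElem?_modify]
              by_cases hrr : p.2.1.toNat = r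
              · have hp2 : p.2.1 = (r : Int) := by omega
                have hcc : p.1.toNat ≠ c := by
                  intro hcceq
                  exact hkey ⟨by omega, hp2⟩
                rcases h' : G[r]? with _ | row'
                · simp
                · simp [hrr, hcc]
              · simp [hrr]
            · rfl
          rw [hskip]
          simp only [pvLastGet, hlast, hkey, if_false]
      · simp [pvLastGet, hlast]

theorem pv_lastGet_none_of_not_mem (l : List (Int × Int × String)) (k : Int × Int)
    (h : k ∉ l.map (fun p => (p.1, p.2.1))) : pvLastGet l k = none := by
  induction l with
  | nil => rfl
  | cons p t ih =>
      simp only [List.map_cons, List.mem_cons, not_or] at h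
      have hk : ¬ (p.1 = k.1 ∧ p.2.1 = k.2) := by
        rintro ⟨h1, h2⟩
        exact h.1 (by rw [Prod.ext_iff]; exact ⟨h1.symm, h2.symm⟩)
      simp [pvLastGet, ih h.2, hk]

theorem pv_lastGet_eq_dictGet (l : List (Int × Int × String)) (k : Int × Int)
    (hnd : (l.map (fun p => (p.1, p.2.1))).Nodup) : pvLastGet l k = pvDictGet l k := by
  induction l with
  | nil => rfl
  | cons p t ih =>
      simp only [List.map_cons, List.nodup_cons] at hnd
      by_cases hkey : p.1 = k.1 ∧ p.2.1 = k.2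
      · have hkp : k = (p.1, p.2.1) := by rw [Prod.ext_iff]; exact ⟨hkey.1.symm, hkey.2.symm⟩
        have hnm : k ∉ t.map (fun p => (p.1, p.2.1)) := by rw [hkp]; exact hnd.1
        have hbeq : (p.1 == k.1 && p.2.1 == k.2) = true := by simp [hkey.1, hkey.2]
        simp [pvLastGet, pv_lastGet_none_of_not_mem t k hnm, hkey, pvDictGet]
      · have hbeq : (p.1 == k.1 && p.2.1 == k.2) = false := by
          rcases not_and_or.1 hkey with h | h <;> simp [h]
        rw [show pvDictGet (p :: t) k = pvDictGet t k from by
          simp [pvDictGet, hbeq], ← ih hnd.2]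
        rcases hlast : pvLastGet t k with _ | v <;> simp [pvLastGet, hlast, hkey]

-- the grid after the scatter pass, row by row
theorem pv_grid_eq (s : List (Int × Int × String))
    (hnd : (s.map (fun p => (p.1, p.2.1))).Nodup) (col_length row_length : Int) :
    s.foldl pvScatterStep
        (List.replicate (row_length + 1).toNat (List.replicate (col_length + 1).toNat "  ")) =
      (PySem.List.pyRange 0 (row_length + 1) 1).map (fun row =>
        (PySem.List.pyRange 0 (col_length + 1) 1).map (fun col => pvCell s col row)) := by
  set W := (col_length + 1).toNat with hW
  set H := (row_length + 1).toNat with hH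
  set G0 : List (List String) := List.replicate H (List.replicate W "  ") with hG0
  have hlenG0 : G0.length = H := by simp [hG0]
  have hrows0 : ∀ row ∈ G0, row.length = W := by
    intro row hrow
    rw [List.eq_of_mem_replicate hrow]; simp
  apply List.ext_getElem?
  intro r
  have hlenL : (s.foldl pvScatterStep G0).length = H := by rw [pv_scatter_length, hlenG0]
  by_cases hrH : r < H
  · have hrR : ((PySem.List.pyRange 0 (row_length + 1) 1).map (fun row =>
        (PySem.List.pyRange 0 (col_length + 1) 1).map (fun col => pvCell s col row)))[r]? =
        some ((PySem.List.pyRange 0 (col_length + 1) 1).map (fun col => pvCell s col ((r : Int)))) := by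
      rw [List.getElem?_map, PySem.List.getElem?_pyRange_one]
      simp only [Int.sub_zero, ← hH]
      simp [hrH]
    rw [hrR]
    have hrL : r < (s.foldl pvScatterStep G0).length := by rw [hlenL]; exact hrH
    rw [List.getElem?_eq_getElem hrL]
    congr 1
    apply List.ext_getElem?
    intro c
    have hrowlen : ((s.foldl pvScatterStep G0)[r]).length = W :=
      pv_scatter_rows s G0 W hrows0 _ (List.getElem_mem hrL)
    by_cases hcW : c < W
    · have hcell := pv_scatter_cell s G0 r c W (by rw [hlenG0]; exact hrH) hrows0 hcW
      rw [List.getElem?_eq_getElem hrL, Option.bind_some] at hcell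
      have hG0cell : G0[r]?.bind (fun row => row[c]?) = some "  " := by
        simp [hG0, hrH, hcW]
      rw [pv_lastGet_eq_dictGet s _ hnd] at hcell
      have hrhs : ((PySem.List.pyRange 0 (col_length + 1) 1).map
          (fun col => pvCell s col ((r : Int))))[c]? = some (pvCell s ((c : Int)) ((r : Int))) := by
        rw [List.getElem?_map, PySem.List.getElem?_pyRange_one]
        simp only [Int.sub_zero, ← hW]
        simp [hcW]
      rw [hrhs, hcell, hG0cell]
      unfold pvCell
      rcases pvDictGet s ((c : Int), (r : Int)) with _ | t <;> rfl
    · rw [List.getElem?_eq_none (by omega), List.getElem?_eq_none (by simp [PySem.List.length_pyRange_one, ← hW]; omega)]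
  · rw [List.getElem?_eq_none (by omega), List.getElem?_eq_none (by simp [PySem.List.length_pyRange_one, ← hH]; omega)]

-- ===== VERDICT (by name: the statement is the Claim_ definition above) =====
theorem pv_A_char (s : List (Int × Int × String)) (col_length row_length : Int) :
    (PySem.List.pyRange 0 (row_length + 1) 1).foldl (fun res row =>
        ((PySem.List.pyRange 0 (col_length + 1) 1).foldl (fun res col =>
          match pvDictGet s (col, row) with
          | some target => res ++ target ++ " "
          | none => res ++ "  ") res) ++ "\n") "" =
      PySem.Str.join "" ((PySem.List.pyRange 0 (row_length + 1) 1).map (fun row =>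
        PySem.Str.join "" ((PySem.List.pyRange 0 (col_length + 1) 1).map
          (fun col => pvCell s col row)) ++ "\n")) := by
  have hinner : ∀ (row : Int) (res : String),
      (PySem.List.pyRange 0 (col_length + 1) 1).foldl (fun res col =>
        match pvDictGet s (col, row) with
        | some target => res ++ target ++ " "
        | none => res ++ "  ") res =
      res ++ PySem.Str.join "" ((PySem.List.pyRange 0 (col_length + 1) 1).map
        (fun col => pvCell s col row)) := by
    intro row res
    have hfun : (fun (res : String) (col : Int) =>
        match pvDictGet s (col, row) with
        | some target => res ++ target ++ " "
        | none => res ++ "  ") = fun res col => res ++ pvCell s col row := by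
      funext res col
      unfold pvCell
      rcases pvDictGet s (col, row) with _ | t <;> simp [String.append_assoc]
    rw [hfun, pv_foldl_append]
  have houter : (fun (res : String) (row : Int) =>
      ((PySem.List.pyRange 0 (col_length + 1) 1).foldl (fun res col =>
        match pvDictGet s (col, row) with
        | some target => res ++ target ++ " "
        | none => res ++ "  ") res) ++ "\n") =
      fun res row => res ++ (PySem.Str.join "" ((PySem.List.pyRange 0 (col_length + 1) 1).map
        (fun col => pvCell s col row)) ++ "\n") := by
    funext res row
    rw [hinner, String.append_assoc]
  rw [houter, pv_foldl_append]
  exact String.empty_append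

theorem print_visible_spec : Claim_equal_print_visible := by
  intro s hdom hpre
  unfold Spec_print_visible
  obtain ⟨hne, hnd⟩ := hpre
  have h1 : (PySem.List.max? (s.map (fun p => p.1)) (fun x => x)).isSome := by
    rw [Option.isSome_iff_ne_none]
    intro h
    rw [PySem.List.max?_eq_none_iff] at h
    exact hne (by simpa using h)
  have h2 : (PySem.List.max? (s.map (fun p => p.2.1)) (fun x => x)).isSome := by
    rw [Option.isSome_iff_ne_none]
    intro h
    rw [PySem.List.max?_eq_none_iff] at h
    exact hne (by simpa using h)
  obtain ⟨col_length, hcol⟩ := Option.isSome_iff_exists.1 h1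
  obtain ⟨row_length, hrow⟩ := Option.isSome_iff_exists.1 h2
  simp only [print_visible, print_visible_alt, hcol, hrow]
  rw [pv_A_char, pv_grid_eq s hnd col_length row_length, List.map_map]
  rfl
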